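-- pv_equiv track=rewrite | github.com/Avalon-467/Teamclaw | src/llm_factory.py | _model_supports_temperature
-- ===== SOURCE A (Python) =====
-- _NO_TEMPERATURE_PREFIXES = ("o1", "o3", "o4")
--
-- def _model_supports_temperature(model: str) -> bool:
--     """检查模型是否支持自定义 temperature 参数。"""
--     model_lower = model.lower()
--     for prefix in _NO_TEMPERATURE_PREFIXES:
--         if model_lower.startswith(prefix) and (
--             len(model_lower) == len(prefix)        # 精确匹配 "o1"
--             or model_lower[len(prefix)] in "-_."   # 匹配 "o3-mini", "o4-mini" 等
--         ):
--             return False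
--     return True
-- ===== SOURCE B (Python) =====
-- def _model_supports_temperature(model: str) -> bool:
--     """Check whether the model supports a custom temperature parameter."""
--     # Take the first segment of the lowered name, up to the first '-', '_' or '.';
--     # temperature is unsupported exactly when that segment is o1/o3/o4.
--     first = []
--     for ch in model.lower():
--         if ch in "-_.":
--             break
--         first.append(ch)
--     return "".join(first) not in ("o1", "o3", "o4")
-- ===== Notes on version B (the rewrite author's own statement) =====
-- stated objective: idiomatic
-- what changed: B extracts the first segment of the lowered name (up to the first '-', '_' or '.') in one scan and tests it against the set {o1,o3,o4}, replacing A's loop over prefixes with startswith plus a manual boundary-character check.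
import Mathlib
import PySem

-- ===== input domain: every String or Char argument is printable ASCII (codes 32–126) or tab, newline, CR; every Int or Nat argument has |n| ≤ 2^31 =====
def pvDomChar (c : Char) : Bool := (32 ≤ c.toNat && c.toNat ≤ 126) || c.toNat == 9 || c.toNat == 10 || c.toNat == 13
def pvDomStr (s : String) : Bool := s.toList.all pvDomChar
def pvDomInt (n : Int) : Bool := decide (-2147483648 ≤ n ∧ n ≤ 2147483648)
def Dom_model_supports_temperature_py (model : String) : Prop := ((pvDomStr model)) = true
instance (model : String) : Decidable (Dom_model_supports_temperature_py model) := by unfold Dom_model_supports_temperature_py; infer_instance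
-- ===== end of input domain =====

-- B tests the first separator-delimited segment of the lowered name against {o1,o3,o4} in one scan,
-- instead of A's loop over prefixes with startswith and a manual boundary-character check (objective: idiomatic).


-- ===== PORT A =====
-- _NO_TEMPERATURE_PREFIXES = ("o1", "o3", "o4")
def pvNoTempPrefixes : List (List Char) := [['o','1'], ['o','3'], ['o','4']]

-- the for-loop over the prefix tuple; 'c in "-_."' for a single char c is char membership (exact);
-- the index model_lower[len(prefix)] is only evaluated when startswith holds and lengths differ, so pyGet? is always some there
def pvALoop (ml : List Char) : List (List Char) → Bool
  | [] => true
  | p :: ps =>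
    if PySem.Chars.startswith ml p &&
        ((ml.length == p.length) ||
          (match PySem.Chars.pyGet? ml (p.length : Int) with
            | some c => ['-','_','.'].contains c
            | none => false)) then
      false
    else
      pvALoop ml ps

def model_supports_temperature_py (model : String) : Bool :=
  pvALoop (PySem.Chars.lower model.toList) pvNoTempPrefixes

-- ===== PORT B =====
-- the for-loop with break collecting chars before the first separator
def pvBFirst : List Char → List Char
  | [] => []
  | c :: cs => if ['-','_','.'].contains c then [] else c :: pvBFirst cs

def model_supports_temperature_py_alt (model : String) : Bool :=
  !(pvNoTempPrefixes.contains (pvBFirst (PySem.Chars.lower model.toList)))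

-- ===== PRECONDITION & SPEC =====
def Spec_model_supports_temperature_py (model : String) (out : Bool) : Prop := out = model_supports_temperature_py_alt model
instance (model : String) (out : Bool) : Decidable (Spec_model_supports_temperature_py model out) := by unfold Spec_model_supports_temperature_py; infer_instance

-- ===== CLAIM (what is proved, stated in full; the proofs are below) =====
def Claim_equal_model_supports_temperature_py : Prop := ∀ (model : String), Dom_model_supports_temperature_py model → Spec_model_supports_temperature_py model (model_supports_temperature_py model)

-- ===== LEMMAS AND PROOFS =====

-- A's per-prefix condition holds exactly when the first segment is that prefix (for prefixes without separators)
theorem pvCond_eq_first (p : List Char) (hp : ∀ a ∈ p, ¬ (['-','_','.'].contains a = true)) :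
    ∀ ml : List Char,
      (PySem.Chars.startswith ml p &&
        ((ml.length == p.length) ||
          (match PySem.Chars.pyGet? ml (p.length : Int) with
            | some c => ['-','_','.'].contains c
            | none => false))) = (pvBFirst ml == p) := by
  induction p with
  | nil =>
    intro ml
    cases ml with
    | nil => decide
    | cons c cs =>
      have hsw : PySem.Chars.startswith (c :: cs) [] = true :=
        (PySem.Chars.startswith_iff _ _).2 (List.nil_prefix)
      simp only [PySem.Chars.pyGet?_eq_listPyGet?, PySem.List.pyGet?_natCast]
      by_cases hc : (['-','_','.'].contains c = true)
      · rcases (show c = '-' ∨ c = '_' ∨ c = '.' by simpa using hc) with rfl | rfl | rfl <;>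
          simp [pvBFirst, hsw]
      · have hc' : ¬(c = '-' ∨ c = '_' ∨ c = '.') := by simpa using hc
        simp [pvBFirst, hsw, hc']
  | cons a p' ih =>
    intro ml
    have ha : ¬ (['-','_','.'].contains a = true) := hp a (by simp)
    have hp' : ∀ b ∈ p', ¬ (['-','_','.'].contains b = true) := fun b hb => hp b (by simp [hb])
    cases ml with
    | nil =>
      have h0 : PySem.Chars.startswith [] (a :: p') = false := by
        rw [← Bool.not_eq_true, PySem.Chars.startswith_iff]; simp
      simp [h0, pvBFirst]
    | cons c cs =>
      by_cases hc : (['-','_','.'].contains c = true)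
      · have hac : a ≠ c := by rintro rfl; exact ha hc
        have hswb : PySem.Chars.startswith (c :: cs) (a :: p') = false := by
          rw [← Bool.not_eq_true, PySem.Chars.startswith_iff]
          rintro ⟨t, ht⟩; exact hac (by injection ht)
        rcases (show c = '-' ∨ c = '_' ∨ c = '.' by simpa using hc) with rfl | rfl | rfl <;>
          simp [pvBFirst, hswb]
      · have hsw : PySem.Chars.startswith (c :: cs) (a :: p')
            = ((a == c) && PySem.Chars.startswith cs p') := by
          by_cases hq : (a :: p') <+: (c :: cs)
          · obtain ⟨rfl, hpre⟩ := List.cons_prefix_cons.1 hq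
            simp [(PySem.Chars.startswith_iff _ _).2 hq, (PySem.Chars.startswith_iff _ _).2 hpre]
          · have h1 : PySem.Chars.startswith (c :: cs) (a :: p') = false := by
              rw [← Bool.not_eq_true, PySem.Chars.startswith_iff]; exact hq
            rw [h1]
            by_cases hac : a = c
            · subst hac
              have h2 : PySem.Chars.startswith cs p' = false := by
                rw [← Bool.not_eq_true, PySem.Chars.startswith_iff]
                intro hp2; exact hq (List.cons_prefix_cons.2 ⟨rfl, hp2⟩)
              simp [h2]
            · simp [hac]
        have ih' := ih hp' cs
        simp only [PySem.Chars.pyGet?_eq_listPyGet?, PySem.List.pyGet?_natCast] at ih' ⊢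
        have hidx : (c :: cs)[(a :: p').length]? = cs[p'.length]? := by simp
        rw [hidx, hsw]
        have hlen : ((c :: cs).length == (a :: p').length : Bool) = (cs.length == p'.length) := by
          simp
        rw [hlen, Bool.and_assoc, ih']
        have hbf : pvBFirst (c :: cs) = c :: pvBFirst cs := by
          have hc' : ¬(c = '-' ∨ c = '_' ∨ c = '.') := by simpa using hc
          simp [pvBFirst, hc']
        rw [hbf]
        by_cases hac : a = c
        · subst hac; simp
        · have hca : ¬(c = a) := fun h => hac h.symm
          have h1 : (a == c) = false := by simpa using hac
          have h2 : ((c :: pvBFirst cs) == (a :: p')) = false := by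
            simp only [beq_eq_false_iff_ne]; intro h; exact hca (by injection h)
          rw [h1, h2, Bool.false_and]

-- the loop over the prefix tuple returns the negated membership of the first segment
theorem pvALoop_eq (ml : List Char) :
    ∀ ps : List (List Char), (∀ p ∈ ps, ∀ a ∈ p, ¬ (['-','_','.'].contains a = true)) →
      pvALoop ml ps = !(ps.contains (pvBFirst ml)) := by
  intro ps
  induction ps with
  | nil => intro _; rfl
  | cons p ps ih =>
    intro h
    have hcond := pvCond_eq_first p (h p (by simp)) ml
    rw [pvALoop, hcond]
    by_cases he : pvBFirst ml = p
    · subst he; simp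
    · have h1 : (pvBFirst ml == p) = false := by simpa using he
      have h2 : (p == pvBFirst ml) = false := by
        rw [beq_eq_false_iff_ne]; exact fun hq => he hq.symm
      rw [h1, if_neg (by simp)]
      rw [ih (fun q hq => h q (by simp [hq]))]
      simp [he]

-- the three prefixes contain no separator characters
theorem pvPrefixes_no_sep : ∀ p ∈ pvNoTempPrefixes, ∀ a ∈ p, ¬ (['-','_','.'].contains a = true) := by
  intro p hp a hap
  simp only [pvNoTempPrefixes, List.mem_cons, List.not_mem_nil, or_false] at hp
  rcases hp with rfl | rfl | rfl <;>
    (simp only [List.mem_cons, List.not_mem_nil, or_false] at hap ;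
     rcases hap with rfl | rfl <;> decide)

-- ===== VERDICT (by name: the statement is the Claim_ definition above) =====
theorem model_supports_temperature_py_spec : Claim_equal_model_supports_temperature_py := by
  intro model _
  unfold Spec_model_supports_temperature_py model_supports_temperature_py model_supports_temperature_py_alt
  exact pvALoop_eq (PySem.Chars.lower model.toList) pvNoTempPrefixes pvPrefixes_no_sep
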